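-- pv_equiv track=rewrite | github.com/suzuki-akira3/token | mytokenizer/mytokenizer.py | setparagraph
-- ===== SOURCE A (Python) =====
-- def setparagraph(tokenlist):
--     paragraphtexts = []
--     indexes = [i for i, w in enumerate(tokenlist) if list(w.values())[0] == '\n']
--     s = 0
--     for index in indexes:
--         e = index + 1
--         text = ''.join([''.join(list(w.values())) for w in tokenlist[s:e]])
--         if text != '\n':
--             paragraphtexts.append(text)
--         s = e
--     return paragraphtexts
-- ===== SOURCE B (Python) =====
-- def setparagraph(tokenlist):
--     paragraphtexts = []
--     buffer = ''
--     for w in tokenlist: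
--         vals = list(w.values())
--         buffer += ''.join(vals)
--         if vals[0] == '\n':
--             if buffer != '\n':
--                 paragraphtexts.append(buffer)
--             buffer = ''
--     return paragraphtexts
-- ===== Notes on version B (the rewrite author's own statement) =====
-- stated objective: simpler
-- what changed: Replaced the index-comprehension plus repeated slicing/joining with a single pass that accumulates a running string buffer and flushes it at each newline token (trailing un-terminated text is never flushed, matching A).
import Mathlib
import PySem

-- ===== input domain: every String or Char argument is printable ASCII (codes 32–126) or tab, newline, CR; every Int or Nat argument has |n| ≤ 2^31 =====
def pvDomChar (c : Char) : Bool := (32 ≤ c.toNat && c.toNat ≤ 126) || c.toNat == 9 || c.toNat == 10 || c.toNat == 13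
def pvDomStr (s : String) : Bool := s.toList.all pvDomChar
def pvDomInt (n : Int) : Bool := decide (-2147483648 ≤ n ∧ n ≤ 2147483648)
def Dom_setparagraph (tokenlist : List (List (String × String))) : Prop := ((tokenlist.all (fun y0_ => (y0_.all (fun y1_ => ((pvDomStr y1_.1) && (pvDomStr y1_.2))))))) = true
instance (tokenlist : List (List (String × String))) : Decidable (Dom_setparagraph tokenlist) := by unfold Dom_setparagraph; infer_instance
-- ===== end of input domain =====

-- B replaces A's index comprehension + slicing with a single pass keeping a running buffer (simpler decomposition, same results).

-- ===== PORT A =====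
def setparagraph (tokenlist : List (List (String × String))) : List String :=
  -- indexes = [i for i, w in enumerate(tokenlist) if list(w.values())[0] == '\n']
  -- (on Pre_ every token is a nonempty dict, so list(w.values())[0] never raises; pyGet? 0 = some "\n" is the test there)
  let indexes : List Int :=
    (PySem.List.enumerate tokenlist).foldl
      (fun acc iw =>
        if PySem.List.pyGet? (PySem.Dict.mk iw.2).values 0 = some "\n" then acc ++ [iw.1] else acc)
      []
  (indexes.foldl
    (fun st index =>
      let e : Int := index + 1
      let text := PySem.Str.join ""
        ((PySem.List.slice tokenlist (some st.2) (some e)).map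
          (fun w => PySem.Str.join "" (PySem.Dict.mk w).values))
      (if text ≠ "\n" then st.1 ++ [text] else st.1, e))
    (([] : List String), (0 : Int))).1

-- ===== PORT B =====
def setparagraph_alt (tokenlist : List (List (String × String))) : List String :=
  (tokenlist.foldl
    (fun st w =>
      let vals := (PySem.Dict.mk w).values
      let buffer := st.2 ++ PySem.Str.join "" vals
      if PySem.List.pyGet? vals 0 = some "\n" then
        (if buffer ≠ "\n" then st.1 ++ [buffer] else st.1, "")
      else (st.1, buffer))
    (([] : List String), "")).1

-- ===== PRECONDITION & SPEC =====
-- Pre_ excludes tokenlists containing an empty token dict: there list(w.values())[0] raises IndexError in A (and in B alike).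
def Pre_setparagraph (tokenlist : List (List (String × String))) : Prop :=
  ∀ w ∈ tokenlist, w ≠ []
instance (tokenlist : List (List (String × String))) : Decidable (Pre_setparagraph tokenlist) := by
  unfold Pre_setparagraph; infer_instance
def pvWitness_setparagraph : (List (List (String × String))) :=
  [[("t", "He"), ("s", "llo")], [("t", "\n")], [("t", "x")]]

def Spec_setparagraph (tokenlist : List (List (String × String))) (out : List String) : Prop := out = setparagraph_alt tokenlist
instance (tokenlist : List (List (String × String))) (out : List String) : Decidable (Spec_setparagraph tokenlist out) := by unfold Spec_setparagraph; infer_instance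

-- ===== CLAIM (what is proved, stated in full; the proofs are below) =====
def Claim_equal_setparagraph : Prop := ∀ (tokenlist : List (List (String × String))), Dom_setparagraph tokenlist → Pre_setparagraph tokenlist → Spec_setparagraph tokenlist (setparagraph tokenlist)

-- ===== LEMMAS AND PROOFS =====

-- ''.join of a token's values / of a list of tokens
def pvText (w : List (String × String)) : String :=
  PySem.Str.join "" (PySem.Dict.mk w).values
def pvTexts (l : List (List (String × String))) : String :=
  PySem.Str.join "" (l.map pvText)

-- common recursive specification: pending-chunk tokens, remaining tokens
def pvGo : List (List (String × String)) → List (List (String × String)) → List String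
  | _, [] => []
  | pend, w :: ws =>
    if PySem.List.pyGet? (PySem.Dict.mk w).values 0 = some "\n" then
      (let t := pvTexts (pend ++ [w]);
       if t ≠ "\n" then t :: pvGo [] ws else pvGo [] ws)
    else pvGo (pend ++ [w]) ws

theorem pvJoinCharsNil (ls : List (List Char)) : PySem.Chars.join [] ls = ls.flatten := by
  induction ls with
  | nil => simp [PySem.Chars.join_nil]
  | cons a t ih =>
    cases t with
    | nil => simp [PySem.Chars.join_singleton]
    | cons b r => rw [PySem.Chars.join_cons_cons]; simp [ih]

theorem pvJoinAppend (a b : List String) :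
    PySem.Str.join "" (a ++ b) = PySem.Str.join "" a ++ PySem.Str.join "" b := by
  simp [PySem.Str.join, pvJoinCharsNil]

theorem pvTexts_nil : pvTexts [] = "" := by
  simp [pvTexts, PySem.Str.join]

theorem pvTexts_append_singleton (l : List (List (String × String))) (w : List (String × String)) :
    pvTexts (l ++ [w]) = pvTexts l ++ pvText w := by
  unfold pvTexts
  rw [List.map_append, pvJoinAppend]
  simp [pvText, PySem.Str.join, pvJoinCharsNil]

-- B's fold equals pvGo
theorem pvAltGo (ws : List (List (String × String))) (acc : List String)
    (pend : List (List (String × String))) :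
    (ws.foldl
      (fun st w =>
        let vals := (PySem.Dict.mk w).values
        let buffer := st.2 ++ PySem.Str.join "" vals
        if PySem.List.pyGet? vals 0 = some "\n" then
          (if buffer ≠ "\n" then st.1 ++ [buffer] else st.1, "")
        else (st.1, buffer))
      (acc, pvTexts pend)).1 = acc ++ pvGo pend ws := by
  induction ws generalizing acc pend with
  | nil => simp [pvGo]
  | cons w ws ih =>
    have hb : pvTexts pend ++ PySem.Str.join "" (PySem.Dict.mk w).values = pvTexts (pend ++ [w]) := by
      rw [pvTexts_append_singleton]; rfl
    by_cases h : PySem.List.pyGet? (PySem.Dict.mk w).values 0 = some "\n"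
    · simp only [List.foldl_cons, hb]
      rw [if_pos h]
      by_cases ht : pvTexts (pend ++ [w]) ≠ "\n"
      · rw [if_pos ht]
        have hx := ih (acc ++ [pvTexts (pend ++ [w])]) []
        rw [pvTexts_nil] at hx
        rw [hx]
        simp only [pvGo]
        rw [if_pos h, if_pos ht]
        simp
      · rw [if_neg ht]
        have hx := ih acc []
        rw [pvTexts_nil] at hx
        rw [hx]
        simp only [pvGo]
        rw [if_pos h, if_neg ht]
    · simp only [List.foldl_cons, hb]
      rw [if_neg h, ih acc (pend ++ [w])]
      simp only [pvGo]
      rw [if_neg h]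

-- indexes of newline tokens, relative, as naturals
def pvIdx : List (List (String × String)) → List Nat
  | [] => []
  | w :: ws => (if PySem.List.pyGet? (PySem.Dict.mk w).values 0 = some "\n" then [0] else []) ++ (pvIdx ws).map (· + 1)

theorem pvIndexesFoldl (l : List (Int × List (String × String))) (acc : List Int) :
    (l.foldl
      (fun acc iw =>
        if PySem.List.pyGet? (PySem.Dict.mk iw.2).values 0 = some "\n" then acc ++ [iw.1] else acc)
      acc)
    = acc ++ (l.filter (fun iw => decide (PySem.List.pyGet? (PySem.Dict.mk iw.2).values 0 = some "\n"))).map (·.1) := by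
  induction l generalizing acc with
  | nil => simp
  | cons p t ih =>
    by_cases h : PySem.List.pyGet? (PySem.Dict.mk p.2).values 0 = some "\n"
    · simp only [List.foldl_cons, List.filter_cons]
      rw [if_pos h, ih]
      have hd : decide (PySem.List.pyGet? (PySem.Dict.mk p.2).values 0 = some "\n") = true := decide_eq_true h
      rw [hd]
      simp
    · simp only [List.foldl_cons, List.filter_cons]
      rw [if_neg h, ih]
      have hd : decide (PySem.List.pyGet? (PySem.Dict.mk p.2).values 0 = some "\n") = false := decide_eq_false h
      rw [hd]
      simp

theorem pvEnumIdx (l : List (List (String × String))) (s : Int) :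
    ((PySem.List.enumerate l s).filter (fun iw => decide (PySem.List.pyGet? (PySem.Dict.mk iw.2).values 0 = some "\n"))).map (·.1)
      = (pvIdx l).map (fun (i : Nat) => (i : Int) + s) := by
  induction l generalizing s with
  | nil => simp [PySem.List.enumerate_nil, pvIdx]
  | cons w ws ih =>
    rw [PySem.List.enumerate_cons, List.filter_cons]
    by_cases h : PySem.List.pyGet? (PySem.Dict.mk w).values 0 = some "\n"
    · rw [if_pos (by simpa using h)]
      rw [List.map_cons, ih (s + 1)]
      simp only [pvIdx, if_pos h, List.singleton_append, List.map_cons, List.map_map]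
      congr 1
      · simp
      · apply List.map_congr_left; intro i _
        simp only [Function.comp_apply]
        push_cast; ring
    · rw [if_neg (by simpa using h)]
      rw [ih (s + 1)]
      simp only [pvIdx, if_neg h, List.nil_append, List.map_map]
      apply List.map_congr_left; intro i _
      simp only [Function.comp_apply]
      push_cast; ring

-- A's fold over the (shifted) newline indexes of the suffix ws equals pvGo on that suffix
theorem pvAMain (tokenlist : List (List (String × String)))
    (ws : List (List (String × String))) (s k : Nat) (acc : List String)
    (h : tokenlist.drop (s + k) = ws) :
    (((pvIdx ws).map (fun (i : Nat) => (i : Int) + ((s : Int) + (k : Int)))).foldl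
      (fun st index =>
        let e : Int := index + 1
        let text := PySem.Str.join ""
          ((PySem.List.slice tokenlist (some st.2) (some e)).map
            (fun w => PySem.Str.join "" (PySem.Dict.mk w).values))
        (if text ≠ "\n" then st.1 ++ [text] else st.1, e))
      (acc, (s : Int))).1
    = acc ++ pvGo ((tokenlist.drop s).take k) ws := by
  induction ws generalizing s k acc with
  | nil => simp [pvIdx, pvGo]
  | cons w ws ih =>
    have hdrop1 : tokenlist.drop (s + k + 1) = ws := by
      have ht := congrArg List.tail h
      rwa [List.tail_drop] at ht
    have hk : (tokenlist.drop s).drop k = w :: ws := by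
      rw [List.drop_drop]; exact h
    have htake : (tokenlist.drop s).take (k + 1) = (tokenlist.drop s).take k ++ [w] := by
      rw [List.take_succ]
      have hg : (tokenlist.drop s)[k]? = some w := by
        rw [← List.head?_drop, hk]; rfl
      rw [hg]; rfl
    have htext : PySem.Str.join ""
        ((PySem.List.slice tokenlist (some (s : Int)) (some ((s : Int) + (k : Int) + 1))).map
          (fun w => PySem.Str.join "" (PySem.Dict.mk w).values))
        = pvTexts ((tokenlist.drop s).take k ++ [w]) := by
      have hc : ((s : Int) + (k : Int) + 1) = ((s + k + 1 : Nat) : Int) := by push_cast; ring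
      rw [hc, PySem.List.slice_natCast]
      have h2 : s + k + 1 - s = k + 1 := by omega
      rw [h2, htake]; rfl
    by_cases hP : PySem.List.pyGet? (PySem.Dict.mk w).values 0 = some "\n"
    · have hidx : (pvIdx (w :: ws)).map (fun (i : Nat) => (i : Int) + ((s : Int) + (k : Int)))
          = ((s : Int) + (k : Int)) ::
            (pvIdx ws).map (fun (i : Nat) => (i : Int) + (((s + k + 1 : Nat) : Int) + ((0 : Nat) : Int))) := by
        simp only [pvIdx, if_pos hP, List.singleton_append, List.map_cons, List.map_map]
        congr 1
        · simp
        · apply List.map_congr_left; intro i _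
          simp only [Function.comp_apply]
          push_cast; ring
      rw [hidx, List.foldl_cons]
      simp only [htext]
      have hstate : ((s : Int) + (k : Int)) + 1 = ((s + k + 1 : Nat) : Int) := by push_cast; ring
      simp only [hstate]
      have happ := ih (s + k + 1) 0
        (if pvTexts ((tokenlist.drop s).take k ++ [w]) ≠ "\n"
          then acc ++ [pvTexts ((tokenlist.drop s).take k ++ [w])] else acc)
        (by simpa using hdrop1)
      rw [List.take_zero] at happ
      rw [happ]
      by_cases hne : pvTexts ((tokenlist.drop s).take k ++ [w]) ≠ "\n"
      · simp only [pvGo]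
        rw [if_pos hP]
        simp [hne]
      · simp only [pvGo]
        rw [if_pos hP]
        push_neg at hne
        simp [hne]
    · have hidx : (pvIdx (w :: ws)).map (fun (i : Nat) => (i : Int) + ((s : Int) + (k : Int)))
          = (pvIdx ws).map (fun (i : Nat) => (i : Int) + ((s : Int) + ((k + 1 : Nat) : Int))) := by
        simp only [pvIdx, if_neg hP, List.nil_append, List.map_map]
        apply List.map_congr_left; intro i _
        simp only [Function.comp_apply]
        push_cast; ring
      rw [hidx]
      have happ := ih s (k + 1) acc (by rw [show s + (k + 1) = s + k + 1 from by omega]; exact hdrop1)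
      rw [happ, htake]
      simp only [pvGo]
      rw [if_neg hP]

-- ===== VERDICT (by name: the statement is the Claim_ definition above) =====
theorem setparagraph_spec : Claim_equal_setparagraph := by
  unfold Claim_equal_setparagraph
  intro tokenlist _ _
  unfold Spec_setparagraph setparagraph setparagraph_alt
  rw [pvIndexesFoldl, List.nil_append, pvEnumIdx tokenlist 0]
  have hB := pvAltGo tokenlist [] []
  rw [pvTexts_nil] at hB
  rw [hB]
  have hA := pvAMain tokenlist tokenlist 0 0 [] (by simp)
  simp only [Nat.cast_zero, add_zero, List.drop_zero, List.take_zero] at hA ⊢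
  rw [hA]
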